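-- pv_equiv track=rewrite | github.com/cdv123/SpamFilter | wordEmbedding.py | make_matrices_2
-- ===== SOURCE A (Python) =====
-- def make_matrices_2(word_dict,pairs):
--     focus_matrix = []
--     context_matrix = []
--     prev_pair = pairs[0][0]
--     pair = 0
--     while pair < len(pairs):
--         focus_matrix.append(word_dict[pairs[pair][0]])
--         context_matrix.append([])
--         while pair < len(pairs) and prev_pair == pairs[pair][0]:
--             context_matrix[-1].append(word_dict[pairs[pair][1]])
--             pair+=1
--         if pair >= len(pairs):
--             break
--         prev_pair = pairs[pair][0]
--     return focus_matrix,context_matrix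
-- ===== SOURCE B (Python) =====
-- def _split_run(rest, f):
--     # split rest into its leading run of pairs whose focus equals f, and the remainder
--     for i, p in enumerate(rest):
--         if p[0] != f:
--             return rest[:i], rest[i:]
--     return rest, []
--
-- def make_matrices_2(word_dict, pairs):
--     # recursive decomposition: peel off the leading run of equal focus words,
--     # recurse on the remainder, and build both matrices by prepending
--     if not pairs:
--         return [], []
--     (f, c), tail = pairs[0], pairs[1:]
--     run, remainder = _split_run(tail, f)
--     fs, cs = make_matrices_2(word_dict, remainder)
--     return [word_dict[f]] + fs, [[word_dict[c]] + [word_dict[x] for _, x in run]] + cs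
-- ===== Notes on version B (the rewrite author's own statement) =====
-- stated objective: alternative
-- what changed: Replaced A's mutating index-driven nested while loops by a recursive decomposition: split off the leading run of equal focus words with slicing, recurse on the remainder, and build both output lists by prepending.
import Mathlib
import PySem

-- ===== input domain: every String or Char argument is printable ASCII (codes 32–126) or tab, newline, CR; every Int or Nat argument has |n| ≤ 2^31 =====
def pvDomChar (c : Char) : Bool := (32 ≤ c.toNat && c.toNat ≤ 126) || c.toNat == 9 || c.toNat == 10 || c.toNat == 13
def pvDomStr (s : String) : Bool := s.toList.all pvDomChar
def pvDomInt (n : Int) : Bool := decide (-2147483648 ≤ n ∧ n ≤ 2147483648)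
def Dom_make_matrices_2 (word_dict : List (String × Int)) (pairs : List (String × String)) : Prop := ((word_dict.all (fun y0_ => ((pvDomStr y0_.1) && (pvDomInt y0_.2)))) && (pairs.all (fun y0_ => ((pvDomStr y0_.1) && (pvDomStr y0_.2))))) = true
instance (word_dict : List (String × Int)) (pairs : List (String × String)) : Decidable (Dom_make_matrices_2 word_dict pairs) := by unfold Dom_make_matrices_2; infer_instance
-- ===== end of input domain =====

-- B replaces A's mutating index-driven nested while loops by a recursive decomposition:
-- split off the leading run of equal focus words, recurse on the remainder, prepend.

-- shared helper: word_dict[k] — dict lookup, total form (Pre_ guarantees the key is present)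
def pvLookup (wd : List (String × Int)) (k : String) : Int :=
  (PySem.Dict.mk wd).getD k 0

-- ===== PORT A =====
-- inner while: 'while pair < len(pairs) and prev_pair == pairs[pair][0]: …append…; pair += 1'
-- (fuel only makes the loop structurally recursive; it is always sufficient)
def mm2AInner (wd : List (String × Int)) (pairs : List (String × String)) (prev : String) :
    Nat → Nat → List Int → List Int × Nat
  | 0, i, ctx => (ctx, i)
  | fuel + 1, i, ctx =>
    match pairs[i]? with
    | some p =>
      if prev == p.1 then mm2AInner wd pairs prev fuel (i + 1) (ctx ++ [pvLookup wd p.2])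
      else (ctx, i)
    | none => (ctx, i)

-- outer while: 'while pair < len(pairs): …'
def mm2AOuter (wd : List (String × Int)) (pairs : List (String × String)) :
    Nat → Nat → String → List Int → List (List Int) → List Int × List (List Int)
  | 0, _, _, focus, ctxs => (focus, ctxs)
  | fuel + 1, i, prev, focus, ctxs =>
    if i < pairs.length then
      let p := pairs[i]?.getD ("", "")
      let focus' := focus ++ [pvLookup wd p.1]
      let r := mm2AInner wd pairs prev (pairs.length - i) i []
      let ctxs' := ctxs ++ [r.1]
      if pairs.length ≤ r.2 then (focus', ctxs')
      else mm2AOuter wd pairs fuel r.2 ((pairs[r.2]?.getD ("", "")).1) focus' ctxs'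
    else (focus, ctxs)

def make_matrices_2 (word_dict : List (String × Int)) (pairs : List (String × String)) : List Int × List (List Int) :=
  -- prev_pair = pairs[0][0] raises IndexError on empty pairs; excluded by Pre_
  let prev := (pairs[0]?.getD ("", "")).1
  mm2AOuter word_dict pairs (pairs.length + 1) 0 prev [] []

-- ===== PORT B =====
-- _split_run(rest, f): scan until the first pair whose focus differs from f,
-- return (leading run, remainder) — the enumerate loop becomes structural recursion
def mm2BSplit (f : String) : List (String × String) → List (String × String) × List (String × String)
  | [] => ([], [])
  | p :: rest =>
    if p.1 ≠ f then ([], p :: rest)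
    else
      let r := mm2BSplit f rest
      (p :: r.1, r.2)

-- termination measure for the B port's recursion on the remainder
theorem mm2BSplit_snd_le (f : String) : ∀ l : List (String × String),
    (mm2BSplit f l).2.length ≤ l.length := by
  intro l
  induction l with
  | nil => simp [mm2BSplit]
  | cons p rest ih =>
    by_cases h : p.1 ≠ f
    · simp [mm2BSplit, h]
    · simp only [mm2BSplit, if_neg h]
      exact Nat.le_succ_of_le ih

def make_matrices_2_alt (word_dict : List (String × Int)) (pairs : List (String × String)) : List Int × List (List Int) :=
  match pairs with
  | [] => ([], [])
  | p :: tail =>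
    let s := mm2BSplit p.1 tail
    let r := make_matrices_2_alt word_dict s.2
    (pvLookup word_dict p.1 :: r.1,
     (pvLookup word_dict p.2 :: s.1.map (fun q => pvLookup word_dict q.2)) :: r.2)
termination_by pairs.length
decreasing_by
  exact Nat.lt_succ_of_le (mm2BSplit_snd_le _ _)

-- ===== PRECONDITION & SPEC =====
-- Pre_ excludes exactly the inputs on which the Python A raises: empty pairs
-- (IndexError at pairs[0][0]) and pairs mentioning a word absent from word_dict (KeyError).
def Pre_make_matrices_2 (word_dict : List (String × Int)) (pairs : List (String × String)) : Prop :=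
  pairs ≠ [] ∧ ∀ p ∈ pairs,
    (PySem.Dict.mk word_dict).contains p.1 = true ∧ (PySem.Dict.mk word_dict).contains p.2 = true
instance (word_dict : List (String × Int)) (pairs : List (String × String)) : Decidable (Pre_make_matrices_2 word_dict pairs) := by unfold Pre_make_matrices_2; infer_instance

def pvWitness_make_matrices_2 : (List (String × Int)) × (List (String × String)) :=
  ([("a", 1), ("b", 2)], [("a", "b"), ("a", "a"), ("b", "a")])

def Spec_make_matrices_2 (word_dict : List (String × Int)) (pairs : List (String × String)) (out : List Int × List (List Int)) : Prop := out = make_matrices_2_alt word_dict pairs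
instance (word_dict : List (String × Int)) (pairs : List (String × String)) (out : List Int × List (List Int)) : Decidable (Spec_make_matrices_2 word_dict pairs out) := by unfold Spec_make_matrices_2; infer_instance

-- ===== CLAIM (what is proved, stated in full; the proofs are below) =====
def Claim_equal_make_matrices_2 : Prop := ∀ (word_dict : List (String × Int)) (pairs : List (String × String)), Dom_make_matrices_2 word_dict pairs → Pre_make_matrices_2 word_dict pairs → Spec_make_matrices_2 word_dict pairs (make_matrices_2 word_dict pairs)

-- ===== LEMMAS AND PROOFS =====

-- reference grouping: focus words of the maximal consecutive runs
def mm2RunsF (wd : List (String × Int)) : List (String × String) → List Int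
  | [] => []
  | p :: rest =>
    pvLookup wd p.1 :: mm2RunsF wd (rest.dropWhile (fun q => p.1 == q.1))
termination_by l => l.length
decreasing_by
  simpa using Nat.lt_succ_of_le (List.length_dropWhile_le _ _)

-- reference grouping: context-word lists of the maximal consecutive runs
def mm2RunsC (wd : List (String × Int)) : List (String × String) → List (List Int)
  | [] => []
  | p :: rest =>
    (pvLookup wd p.2 :: (rest.takeWhile (fun q => p.1 == q.1)).map (fun q => pvLookup wd q.2))
      :: mm2RunsC wd (rest.dropWhile (fun q => p.1 == q.1))
termination_by l => l.length
decreasing_by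
  simpa using Nat.lt_succ_of_le (List.length_dropWhile_le _ _)

theorem mm2AInner_spec (wd : List (String × Int)) (pairs : List (String × String)) (prev : String) :
    ∀ fuel i ctx, pairs.length - i ≤ fuel →
      mm2AInner wd pairs prev fuel i ctx =
        (ctx ++ ((pairs.drop i).takeWhile (fun q => prev == q.1)).map (fun q => pvLookup wd q.2),
         i + ((pairs.drop i).takeWhile (fun q => prev == q.1)).length) := by
  intro fuel
  induction fuel with
  | zero =>
    intro i ctx hf
    have hd : pairs.drop i = [] := List.drop_eq_nil_of_le (by omega)
    simp [mm2AInner, hd]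
  | succ fuel ih =>
    intro i ctx hf
    cases hpi : pairs[i]? with
    | none =>
      have hlen : pairs.length ≤ i := by
        simpa using List.getElem?_eq_none_iff.mp hpi
      have hd : pairs.drop i = [] := List.drop_eq_nil_of_le hlen
      simp [mm2AInner, hpi, hd]
    | some p =>
      have hi : i < pairs.length := by
        rcases List.getElem?_eq_some_iff.mp hpi with ⟨h, _⟩; exact h
      have hp : pairs[i] = p := by
        rcases List.getElem?_eq_some_iff.mp hpi with ⟨_, h⟩; exact h
      have hd : pairs.drop i = p :: pairs.drop (i + 1) := by
        rw [List.drop_eq_getElem_cons hi, hp]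
      by_cases hb : (prev == p.1) = true
      · rw [show mm2AInner wd pairs prev (fuel + 1) i ctx
            = mm2AInner wd pairs prev fuel (i + 1) (ctx ++ [pvLookup wd p.2]) by
            simp [mm2AInner, hpi, hb]]
        rw [ih (i + 1) _ (by omega), hd]
        simp [hb]
        omega
      · simp [mm2AInner, hpi, hb, hd]

theorem drop_length_takeWhile {α : Type} (p : α → Bool) (l : List α) :
    l.drop (l.takeWhile p).length = l.dropWhile p := by
  induction l with
  | nil => simp
  | cons x xs ih =>
    by_cases hx : p x = true
    · simpa [hx] using ih
    · simp [hx]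

theorem mm2AOuter_spec (wd : List (String × Int)) (pairs : List (String × String)) :
    ∀ fuel i focus ctxs (h : i < pairs.length), pairs.length - i ≤ fuel →
      mm2AOuter wd pairs fuel i (pairs[i]'h).1 focus ctxs =
        (focus ++ mm2RunsF wd (pairs.drop i), ctxs ++ mm2RunsC wd (pairs.drop i)) := by
  intro fuel
  induction fuel with
  | zero => intro i focus ctxs h hf; omega
  | succ fuel ih =>
    intro i focus ctxs h hf
    have hp : pairs[i]? = some (pairs[i]'h) := List.getElem?_eq_getElem h
    have hd : pairs.drop i = pairs[i]'h :: pairs.drop (i + 1) :=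
      List.drop_eq_getElem_cons h
    have hinner := mm2AInner_spec wd pairs (pairs[i]'h).1 (pairs.length - i) i [] (le_refl _)
    rw [hd] at hinner
    rw [List.takeWhile_cons_of_pos (by simp)] at hinner
    set k := ((pairs.drop (i + 1)).takeWhile (fun q => (pairs[i]'h).1 == q.1)).length with hk
    have hdd : pairs.drop (i + 1 + k) =
        (pairs.drop (i + 1)).dropWhile (fun q => (pairs[i]'h).1 == q.1) := by
      rw [← List.drop_drop, hk, drop_length_takeWhile]
    rw [show mm2AOuter wd pairs (fuel + 1) i (pairs[i]'h).1 focus ctxs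
        = (if pairs.length ≤ i + (1 + k) then
            (focus ++ [pvLookup wd (pairs[i]'h).1],
             ctxs ++ [[] ++ (pvLookup wd (pairs[i]'h).2 ::
               ((pairs.drop (i + 1)).takeWhile (fun q => (pairs[i]'h).1 == q.1)).map
                 (fun q => pvLookup wd q.2))])
          else mm2AOuter wd pairs fuel (i + (1 + k))
            ((pairs[i + (1 + k)]?.getD ("", "")).1)
            (focus ++ [pvLookup wd (pairs[i]'h).1])
            (ctxs ++ [[] ++ (pvLookup wd (pairs[i]'h).2 ::
               ((pairs.drop (i + 1)).takeWhile (fun q => (pairs[i]'h).1 == q.1)).map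
                 (fun q => pvLookup wd q.2))])) by
      simp only [mm2AOuter, if_pos h, hp, hinner, List.length_cons, List.map_cons,
        Option.getD_some, List.nil_append]
      rw [show k + 1 = 1 + k from by omega]]
    by_cases hend : pairs.length ≤ i + (1 + k)
    · have hnil : (pairs.drop (i + 1)).dropWhile (fun q => (pairs[i]'h).1 == q.1) = [] := by
        rw [← hdd]; exact List.drop_eq_nil_of_le (by omega)
      rw [if_pos hend, hd]
      rw [mm2RunsF, mm2RunsC, hnil, mm2RunsF, mm2RunsC]
      simp
    · rw [if_neg hend]
      have h2 : i + (1 + k) < pairs.length := by omega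
      have hp2 : pairs[i + (1 + k)]? = some (pairs[i + (1 + k)]'h2) :=
        List.getElem?_eq_getElem h2
      rw [hp2]
      have := ih (i + (1 + k)) (focus ++ [pvLookup wd (pairs[i]'h).1])
        (ctxs ++ [[] ++ (pvLookup wd (pairs[i]'h).2 ::
           ((pairs.drop (i + 1)).takeWhile (fun q => (pairs[i]'h).1 == q.1)).map
             (fun q => pvLookup wd q.2))]) h2 (by omega)
      simp only [Option.getD_some] at this ⊢
      rw [this]
      have hia : i + (1 + k) = i + 1 + k := by omega
      rw [hia, hdd, hd, mm2RunsF, mm2RunsC]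
      simp

-- B's run splitter is takeWhile/dropWhile of the run predicate
theorem mm2BSplit_eq (f : String) (l : List (String × String)) :
    mm2BSplit f l = (l.takeWhile (fun q => f == q.1), l.dropWhile (fun q => f == q.1)) := by
  induction l with
  | nil => simp [mm2BSplit]
  | cons p rest ih =>
    by_cases h : p.1 = f
    · have hb : (f == p.1) = true := by simp [h]
      simp [mm2BSplit, h, ih]
    · have hb : (f == p.1) = false := by simp [Ne.symm h]
      simp [mm2BSplit, h, hb]

-- B computes exactly the run grouping
theorem mm2Alt_eq_runs (wd : List (String × Int)) :
    ∀ n (l : List (String × String)), l.length ≤ n →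
      make_matrices_2_alt wd l = (mm2RunsF wd l, mm2RunsC wd l) := by
  intro n
  induction n with
  | zero =>
    intro l hl
    have : l = [] := List.eq_nil_of_length_eq_zero (by omega)
    subst this
    simp [make_matrices_2_alt, mm2RunsF, mm2RunsC]
  | succ n ih =>
    intro l hl
    match l with
    | [] => simp [make_matrices_2_alt, mm2RunsF, mm2RunsC]
    | p :: tail =>
      have hs := mm2BSplit_eq p.1 tail
      have hrec := ih (tail.dropWhile (fun q => p.1 == q.1))
        (by have := List.length_dropWhile_le (fun q => p.1 == q.1) tail; simp at hl; omega)
      rw [make_matrices_2_alt, hs]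
      simp only [hrec]
      rw [mm2RunsF, mm2RunsC]

-- ===== VERDICT (by name: the statement is the Claim_ definition above) =====
theorem make_matrices_2_spec : Claim_equal_make_matrices_2 := by
  intro wd pairs _ hpre
  unfold Spec_make_matrices_2
  match pairs, hpre with
  | p :: rest, _ =>
    have h0 : 0 < (p :: rest).length := by simp
    have hA : make_matrices_2 wd (p :: rest) =
        (mm2RunsF wd (p :: rest), mm2RunsC wd (p :: rest)) := by
      unfold make_matrices_2
      have : (((p :: rest)[0]?).getD ("", "")).1 = ((p :: rest)[0]'h0).1 := by simp
      rw [this, mm2AOuter_spec wd (p :: rest) ((p :: rest).length + 1) 0 [] [] h0 (by omega)]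
      simp
    rw [hA, mm2Alt_eq_runs wd (p :: rest).length (p :: rest) (le_refl _)]
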